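-- pv_equiv track=rewrite | github.com/ioanaNasui/IoanaNasui_PythonPOC3 | List_and_tuples_optional/main.py | three_by_three_matrix
-- ===== SOURCE A (Python) =====
-- def three_by_three_matrix(matrix_size):
--     # Generate a 3 by 3 matrix that contains 'X' on the main diagonal and '_' in the rest.
--     matrix = []
--     for i in range(matrix_size):
--         row = []
--         for j in range(matrix_size):
--             if i == j:
--                 row.append('X')  # nu trebuie sa fie row=row.append() deoarece returneaza "None"
--             else:
--                 row.append('_')
--         matrix.append(row)
--     return matrix
-- ===== SOURCE B (Python) =====
-- def three_by_three_matrix(matrix_size):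
--     # Flat periodic buffer: in row-major order the diagonal pattern is just
--     # 'X' followed by matrix_size '_', repeated; each row is a slice of it.
--     if matrix_size <= 0:
--         return []
--     n = matrix_size
--     flat = (['X'] + ['_'] * n) * n
--     return [flat[i * n : i * n + n] for i in range(n)]
-- ===== Notes on version B (the rewrite author's own statement) =====
-- stated objective: alternative
-- what changed: Replaces the doubly-nested loop with per-cell i==j tests by a flat periodic buffer: in row-major order the pattern is 'X' followed by n '_' repeated n times, so the matrix is built once as one flat list and each row is a slice of it.
import Mathlib
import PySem

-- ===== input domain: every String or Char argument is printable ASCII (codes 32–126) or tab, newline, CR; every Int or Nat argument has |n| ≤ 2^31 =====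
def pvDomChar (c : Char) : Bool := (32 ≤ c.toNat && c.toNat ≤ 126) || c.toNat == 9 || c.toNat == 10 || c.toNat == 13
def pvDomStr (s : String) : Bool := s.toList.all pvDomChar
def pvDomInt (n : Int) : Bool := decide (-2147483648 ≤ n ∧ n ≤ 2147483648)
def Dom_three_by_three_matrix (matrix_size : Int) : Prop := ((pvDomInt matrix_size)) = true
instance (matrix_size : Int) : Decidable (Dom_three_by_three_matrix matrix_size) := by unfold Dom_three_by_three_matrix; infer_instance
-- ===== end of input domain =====

-- B replaces the nested loops with per-cell i == j tests by a flat periodic buffer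
-- ('X' followed by n '_', repeated n times) sliced into rows; alternative algorithm, same cost.

-- ===== PORT A =====
def three_by_three_matrix (matrix_size : Int) : List (List String) :=
  (PySem.List.pyRange 0 matrix_size 1).foldl
    (fun matrix i =>
      matrix ++ [(PySem.List.pyRange 0 matrix_size 1).foldl
        (fun row j => row ++ [if i == j then "X" else "_"]) []])
    []

-- ===== PORT B =====
-- Source B: flat = (['X'] + ['_'] * n) * n, then [flat[i*n : i*n+n] for i in range(n)].
-- List `* n` is List.flatten (List.replicate n …); the slice is PySem.List.slice.
def three_by_three_matrix_alt (matrix_size : Int) : List (List String) :=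
  if matrix_size ≤ 0 then []
  else
    let n := matrix_size
    let flat := (List.replicate n.toNat (["X"] ++ List.replicate n.toNat "_")).flatten
    (PySem.List.pyRange 0 n 1).map
      (fun i => PySem.List.slice flat (some (i * n)) (some (i * n + n)))

-- ===== PRECONDITION & SPEC =====
def Spec_three_by_three_matrix (matrix_size : Int) (out : List (List String)) : Prop := out = three_by_three_matrix_alt matrix_size
instance (matrix_size : Int) (out : List (List String)) : Decidable (Spec_three_by_three_matrix matrix_size out) := by unfold Spec_three_by_three_matrix; infer_instance

-- ===== CLAIM (what is proved, stated in full; the proofs are below) =====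
def Claim_equal_three_by_three_matrix : Prop := ∀ (matrix_size : Int), Dom_three_by_three_matrix matrix_size → Spec_three_by_three_matrix matrix_size (three_by_three_matrix matrix_size)

-- ===== LEMMAS AND PROOFS =====

theorem foldl_append_singleton {α β : Type} (f : α → β) (l : List α) (init : List β) :
    l.foldl (fun acc x => acc ++ [f x]) init = init ++ l.map f := by
  induction l generalizing init with
  | nil => simp
  | cons x xs ih => simp [List.foldl, ih]

-- A's row i (for 0 ≤ i < n) as a map over List.range
theorem row_eq_map (n i : Int) (h0 : 0 ≤ i) (h1 : i < n) :
    (PySem.List.pyRange 0 n 1).foldl (fun row j => row ++ [if i == j then "X" else "_"]) []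
      = (List.range n.toNat).map (fun k => if i.toNat = k then "X" else "_") := by
  rw [foldl_append_singleton (fun j => if i == j then "X" else "_")]
  rw [PySem.List.pyRange_one]
  simp only [List.map_map, List.nil_append]
  have hn : (n - 0).toNat = n.toNat := by omega
  rw [hn]
  apply List.map_congr_left
  intro k _
  simp only [Function.comp_apply, zero_add]
  by_cases h : i = (k : Int)
  · simp [h]
  · have : ¬ i.toNat = k := by omega
    simp [h, this]

-- flatten of a replicated block, read through getElem?: periodic with period l.length
theorem getElem?_flatten_replicate {α : Type} (l : List α) (m j : Nat)
    (hj : j < m * l.length) :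
    (List.flatten (List.replicate m l))[j]? = l[j % l.length]? := by
  induction m generalizing j with
  | zero => omega
  | succ m ih =>
    rw [List.replicate_succ, List.flatten_cons]
    have hsm : (m + 1) * l.length = m * l.length + l.length := Nat.succ_mul m l.length
    by_cases h : j < l.length
    · rw [List.getElem?_append_left h, Nat.mod_eq_of_lt h]
    · have hL : 0 < l.length := by
        rcases Nat.eq_zero_or_pos l.length with h0 | h0
        · rw [h0, Nat.mul_zero] at hj; omega
        · exact h0
      rw [List.getElem?_append_right (by omega)]
      have hmod : j % l.length = (j - l.length) % l.length := by
        conv_lhs => rw [show j = l.length + (j - l.length) by omega]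
        exact Nat.add_mod_left _ _
      rw [hmod]
      exact ih (j - l.length) (by omega)

-- B's flat buffer read at position p < n*(n+1): 'X' exactly at multiples of n+1
theorem flat_getElem? (n p : Nat) (hp : p < n * (n + 1)) :
    (List.flatten (List.replicate n (["X"] ++ List.replicate n "_")))[p]?
      = some (if p % (n + 1) = 0 then "X" else "_") := by
  have hlen : (["X"] ++ List.replicate n "_").length = n + 1 := by simp
  rw [getElem?_flatten_replicate _ _ _ (by rw [hlen]; omega), hlen]
  have hr : p % (n + 1) < n + 1 := Nat.mod_lt _ (by omega)
  rcases Nat.eq_zero_or_pos (p % (n + 1)) with h0 | h0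
  · simp [h0]
  · have : ¬ p % (n + 1) = 0 := by omega
    rw [if_neg this]
    rcases Nat.exists_eq_add_of_lt hr with ⟨c, hc⟩
    rw [show p % (n+1) = (p % (n+1) - 1) + 1 by omega]
    simp only [List.cons_append, List.nil_append, List.getElem?_cons_succ]
    rw [List.getElem?_replicate]
    simp only [if_pos (by omega : p % (n+1) - 1 < n)]

-- the key residue computation: for i, k < n, (i*n + k) % (n+1) = 0 ↔ k = i
theorem residue_zero_iff (n i k : Nat) (hi : i < n) (hk : k < n) :
    (i * n + k) % (n + 1) = 0 ↔ k = i := by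
  by_cases h : i ≤ k
  · have he : i * n + k = (k - i) + i * (n + 1) := by
      have h2 : i * (n + 1) = i * n + i := by ring
      omega
    rw [he, Nat.add_mul_mod_self_right, Nat.mod_eq_of_lt (by omega)]
    omega
  · have he : i * n + k = (n + 1 + k - i) + (i - 1) * (n + 1) := by
      have h1 : i * (n + 1) = i * n + i := by ring
      have h2 : (i - 1) * (n + 1) + 1 * (n + 1) = (i - 1 + 1) * (n + 1) := by ring
      have h3 : i - 1 + 1 = i := by omega
      rw [h3] at h2
      omega
    rw [he, Nat.add_mul_mod_self_right, Nat.mod_eq_of_lt (by omega)]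
    omega

-- B's row i equals A's row i, elementwise
theorem slice_row_eq (n i : Int) (h0 : 0 ≤ i) (h1 : i < n) :
    PySem.List.slice
        (List.flatten (List.replicate n.toNat (["X"] ++ List.replicate n.toNat "_")))
        (some (i * n)) (some (i * n + n))
      = (List.range n.toNat).map (fun k => if i.toNat = k then "X" else "_") := by
  set N : Nat := n.toNat with hN
  set I : Nat := i.toNat with hI
  have hi' : ((I : Nat) : Int) = i := by rw [hI]; exact Int.toNat_of_nonneg h0
  have hn' : ((N : Nat) : Int) = n := by rw [hN]; exact Int.toNat_of_nonneg (by omega)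
  have hinn : (i * n + n : Int) = ((I * N + N : Nat) : Int) := by
    rw [Nat.cast_add, Nat.cast_mul, hi', hn']
  have hin : (i * n : Int) = ((I * N : Nat) : Int) := by rw [Nat.cast_mul, hi', hn']
  rw [hinn, hin, PySem.List.slice_natCast]
  have hsub : I * N + N - I * N = N := by omega
  rw [hsub]
  have hflatlen : (List.flatten (List.replicate N (["X"] ++ List.replicate N "_"))).length
      = N * (N + 1) := by simp
  apply List.ext_getElem?
  intro k
  by_cases hk : k < N
  · have hIN : I < N := by omega
    have hp : I * N + k < N * (N + 1) := by nlinarith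
    rw [List.getElem?_take, if_pos hk, List.getElem?_drop]
    rw [flat_getElem? N (I * N + k) hp]
    rw [List.getElem?_map, List.getElem?_range hk]
    simp only [Option.map_some]
    congr 1
    rcases (residue_zero_iff N I k hIN hk) with ⟨h₁, h₂⟩
    by_cases he : I = k
    · rw [if_pos he, if_pos (h₂ he.symm)]
    · rw [if_neg he, if_neg (fun hc => he (h₁ hc).symm)]
  · rw [List.getElem?_take, if_neg hk]
    rw [List.getElem?_eq_none (by simp; omega)]

-- ===== VERDICT (by name: the statement is the Claim_ definition above) =====
theorem three_by_three_matrix_spec : Claim_equal_three_by_three_matrix := by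
  intro n _
  unfold Spec_three_by_three_matrix three_by_three_matrix three_by_three_matrix_alt
  rw [foldl_append_singleton
    (fun i => (PySem.List.pyRange 0 n 1).foldl (fun row j => row ++ [if i == j then "X" else "_"]) [])]
  by_cases hn : n ≤ 0
  · simp [hn]
  · simp only [hn, if_false, List.nil_append]
    apply List.map_congr_left
    intro i hi
    rw [PySem.List.mem_pyRange_one] at hi
    rw [row_eq_map n i hi.1 hi.2, slice_row_eq n i hi.1 hi.2]
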